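-- pv_equiv track=rewrite | github.com/jkmckenna/smftools | src/smftools/informatics/modkit_extract_to_adata.py | _split_read_set
-- ===== SOURCE A (Python) =====
-- def _split_read_set(read_names: set[str], n_chunks: int) -> list[set[str]]:
--     """Split read names into roughly equal subsets."""
--     read_list = sorted(read_names)
--     n_chunks = min(n_chunks, len(read_list)) or 1
--     chunk_size, remainder = divmod(len(read_list), n_chunks)
--     chunks: list[set[str]] = []
--     start = 0
--     for i in range(n_chunks):
--         end = start + chunk_size + (1 if i < remainder else 0)
--         chunks.append(set(read_list[start:end]))
--         start = end
--     return chunks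
-- ===== SOURCE B (Python) =====
-- def _split_read_set(read_names: set[str], n_chunks: int) -> list[set[str]]:
--     """Split read names into roughly equal subsets, built back-to-front:
--     the last of the k remaining chunks always gets the floor(end / k) share."""
--     read_list = sorted(read_names)
--     k = min(n_chunks, len(read_list)) or 1
--     end = len(read_list)
--     chunks: list[set[str]] = []
--     while k > 0:
--         size = end // k
--         chunks.append(set(read_list[end - size:end]))
--         end -= size
--         k -= 1
--     chunks.reverse()
--     return chunks
-- ===== Notes on version B (the rewrite author's own statement) =====
-- stated objective: alternative
-- what changed: B builds the chunk list back-to-front: instead of A's divmod into chunk_size+remainder and forward start/end slicing, it repeatedly peels the floor(end/k) last share off the end of the sorted list and reverses at the end, with no remainder bookkeeping.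
import Mathlib
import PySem

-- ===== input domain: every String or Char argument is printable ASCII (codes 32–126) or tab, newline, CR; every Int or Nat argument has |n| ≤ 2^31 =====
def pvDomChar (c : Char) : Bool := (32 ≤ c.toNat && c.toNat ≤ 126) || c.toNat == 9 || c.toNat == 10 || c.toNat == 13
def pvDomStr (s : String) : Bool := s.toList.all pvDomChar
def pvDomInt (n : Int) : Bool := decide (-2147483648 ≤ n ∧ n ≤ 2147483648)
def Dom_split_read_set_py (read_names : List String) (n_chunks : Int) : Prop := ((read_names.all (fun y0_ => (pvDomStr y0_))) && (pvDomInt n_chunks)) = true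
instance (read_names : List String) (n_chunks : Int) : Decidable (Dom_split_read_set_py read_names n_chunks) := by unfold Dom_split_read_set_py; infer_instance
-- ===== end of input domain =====

-- B builds the chunk list back-to-front, peeling the floor(end/k) last share off the end each
-- step and reversing, instead of A's divmod + forward start/end slicing (alternative, same cost).

-- ===== PORT A =====
def split_read_set_py (read_names : List String) (n_chunks : Int) : List (List String) :=
  let read_list := PySem.List.sorted read_names (fun x => x) false
  let m : Int := (read_list.length : Int)
  -- n_chunks = min(n_chunks, len(read_list)) or 1
  let n : Int := if min n_chunks m = 0 then 1 else min n_chunks m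
  -- chunk_size, remainder = divmod(len(read_list), n)   (n ≠ 0 by construction)
  let chunk_size := PySem.Int.floordiv m n
  let remainder := PySem.Int.mod m n
  ((PySem.List.pyRange 0 n 1).foldl
    (fun (st : List (List String) × Int) i =>
      let e := st.2 + chunk_size + (if i < remainder then 1 else 0)
      (st.1 ++ [PySem.Set.ofList (PySem.List.slice read_list (some st.2) (some e))], e))
    ([], 0)).1

-- ===== PORT B =====
-- the while-loop of Source B: state (chunks, end, k); while k > 0 peel read_list[end-size:end]
-- with size = end // k off the back, then reverse
def pvPeel (read_list : List String) (k end_ : Int) (chunks : List (List String)) : List (List String) :=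
  if _h : 0 < k then
    pvPeel read_list (k - 1) (end_ - PySem.Int.floordiv end_ k)
      (chunks ++ [PySem.Set.ofList (PySem.List.slice read_list
        (some (end_ - PySem.Int.floordiv end_ k)) (some end_))])
  else chunks
termination_by k.toNat
decreasing_by omega

def split_read_set_py_alt (read_names : List String) (n_chunks : Int) : List (List String) :=
  let read_list := PySem.List.sorted read_names (fun x => x) false
  let k : Int := if min n_chunks (read_list.length : Int) = 0 then 1
                 else min n_chunks (read_list.length : Int)
  (pvPeel read_list k (read_list.length : Int) []).reverse

-- ===== PRECONDITION & SPEC =====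
def Spec_split_read_set_py (read_names : List String) (n_chunks : Int) (out : List (List String)) : Prop := out = split_read_set_py_alt read_names n_chunks
instance (read_names : List String) (n_chunks : Int) (out : List (List String)) : Decidable (Spec_split_read_set_py read_names n_chunks out) := by unfold Spec_split_read_set_py; infer_instance

-- ===== CLAIM (what is proved, stated in full; the proofs are below) =====
def Claim_equal_split_read_set_py : Prop := ∀ (read_names : List String) (n_chunks : Int), Dom_split_read_set_py read_names n_chunks → Spec_split_read_set_py read_names n_chunks (split_read_set_py read_names n_chunks)

-- ===== LEMMAS AND PROOFS =====

-- uniqueness of Euclidean quotient/remainder, positive divisor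
lemma pv_divmod {a b q r : Int} (hb : 0 < b) (h : r + b * q = a) (h0 : 0 ≤ r) (h1 : r < b) :
    a / b = q ∧ a % b = r :=
  (Int.ediv_emod_unique'' (show b ≠ 0 by omega)).mpr ⟨h, h0, by rwa [abs_of_pos hb]⟩

-- range(0, b) is empty for b ≤ 0
lemma pyRange_nonpos (b : Int) (h : b ≤ 0) : PySem.List.pyRange 0 b 1 = [] := by
  simp [PySem.List.pyRange]; omega

-- proof-side ladder: the sequence of chunks A's loop emits, with the remainder counted down
def pvStream (names : List String) (q r : Int) : Nat → List (List String)
  | 0 => []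
  | Nat.succ n =>
    let t := q + (if 0 < r then 1 else 0)
    PySem.Set.ofList (names.take t.toNat) :: pvStream (names.drop t.toNat) q (r - 1) n

lemma pvStream_succ (names : List String) (q r : Int) (n : Nat) :
    pvStream names q r (n + 1)
      = PySem.Set.ofList (names.take (q + (if 0 < r then 1 else 0)).toNat)
        :: pvStream (names.drop (q + (if 0 < r then 1 else 0)).toNat) q (r - 1) n := rfl

lemma pvStream_nonpos (q : Int) : ∀ (n : Nat) (names : List String) (r r' : Int),
    r ≤ 0 → r' ≤ 0 → pvStream names q r n = pvStream names q r' n := by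
  intro n
  induction n with
  | zero => intro _ _ _ _ _; rfl
  | succ n ih =>
    intro names r r' hr hr'
    simp only [pvStream]
    rw [if_neg (by omega), if_neg (by omega)]
    exact congrArg _ (ih _ (r - 1) (r' - 1) (by omega) (by omega))

-- a saturated remainder is the same as bumping the quotient
lemma pvStream_bump (q : Int) : ∀ (n : Nat) (names : List String) (r r' : Int),
    (n : Int) ≤ r → r' ≤ 0 → pvStream names q r n = pvStream names (q + 1) r' n := by
  intro n
  induction n with
  | zero => intro _ _ _ _ _; rfl
  | succ n ih =>
    intro names r r' hr hr'
    have hrpos : 0 < r := by push_cast at hr; omega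
    simp only [pvStream]
    rw [if_pos hrpos, if_neg (by omega)]
    rw [show q + 1 + 0 = q + 1 by ring]
    exact congrArg _ (ih _ (r - 1) (r' - 1) (by push_cast at hr ⊢; omega) (by omega))

-- pvStream only reads the first n*q + max r 0 elements
lemma pvStream_prefix (q : Int) (hq : 0 ≤ q) : ∀ (n : Nat) (names : List String) (r : Int) (N : Nat),
    (n : Int) * q + max r 0 ≤ (N : Int) →
    pvStream (names.take N) q r n = pvStream names q r n := by
  intro n
  induction n with
  | zero => intro _ _ _ _; rfl
  | succ n ih =>
    intro names r N hN
    push_cast at hN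
    have hexp : ((n : Int) + 1) * q = (n : Int) * q + q := by ring
    rw [hexp] at hN
    have hnq : 0 ≤ (n : Int) * q := by positivity
    have ht : (q + (if 0 < r then 1 else 0)).toNat ≤ N := by split_ifs <;> omega
    simp only [pvStream]
    rw [List.take_take, Nat.min_eq_left ht, List.drop_take]
    rw [ih (names.drop (q + (if 0 < r then 1 else 0)).toNat) (r - 1)
      (N - (q + (if 0 < r then 1 else 0)).toNat) (by split_ifs <;> omega)]

-- the last of n+1 chunks is the q-sized one sitting at position n*q + r
lemma pvStream_last (q : Int) (hq : 0 ≤ q) : ∀ (n : Nat) (names : List String) (r : Int),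
    0 ≤ r → r ≤ (n : Int) →
    pvStream names q r (n + 1)
      = pvStream names q r n
        ++ [PySem.Set.ofList ((names.drop ((n : Int) * q + r).toNat).take q.toNat)] := by
  intro n
  induction n with
  | zero =>
    intro names r h0 h1
    have hr : r = 0 := by exact_mod_cast le_antisymm h1 h0
    subst hr
    simp [pvStream]
  | succ n ih =>
    intro names r h0 h1
    have hnq : 0 ≤ (n : Int) * q := by positivity
    rcases Int.lt_or_le 0 r with hr | hr
    · -- r > 0 : first chunk has size q+1, recurse with r-1
      rw [pvStream_succ names q r (n + 1), pvStream_succ names q r n]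
      rw [if_pos hr]
      rw [ih (names.drop (q + 1).toNat) (r - 1) (by omega) (by push_cast at h1 ⊢; omega)]
      rw [List.drop_drop]
      rw [show ((q + 1).toNat + ((n : Int) * q + (r - 1)).toNat)
            = (((n + 1 : Nat) : Int) * q + r).toNat from by
        push_cast
        have hexp : ((n : Int) + 1) * q = (n : Int) * q + q := by ring
        omega]
      simp
    · -- r = 0 : first chunk has size q, remainder stays exhausted
      have hr0 : r = 0 := by omega
      subst hr0
      rw [pvStream_succ names q 0 (n + 1), pvStream_succ names q 0 n]
      rw [if_neg (by omega)]
      rw [pvStream_nonpos q (n + 1) (names.drop (q + 0).toNat) (0 - 1) 0 (by omega) (by omega)]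
      rw [ih (names.drop (q + 0).toNat) 0 (by omega) (by positivity)]
      rw [pvStream_nonpos q n (names.drop (q + 0).toNat) (0 - 1) 0 (by omega) (by omega)]
      rw [List.drop_drop]
      rw [show ((q + 0).toNat + ((n : Int) * q + 0).toNat)
            = (((n + 1 : Nat) : Int) * q + 0).toNat from by
        push_cast
        have hexp : ((n : Int) + 1) * q = (n : Int) * q + q := by ring
        omega]
      simp

-- the back-to-front peel builds exactly the reversed chunk ladder
lemma peel_eq (names : List String) : ∀ (k : Nat) (end_ : Int) (acc : List (List String)),
    0 ≤ end_ → end_ ≤ (names.length : Int) →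
    pvPeel names (k : Int) end_ acc
      = acc ++ (pvStream (names.take end_.toNat) (end_ / (k : Int)) (end_ % (k : Int)) k).reverse := by
  intro k
  induction k with
  | zero =>
    intro end_ acc _ _
    rw [pvPeel]
    norm_num [pvStream]
  | succ k ih =>
    intro end_ acc h0 h1
    have hK : (0:Int) < ((k + 1 : Nat) : Int) := by positivity
    rw [pvPeel, dif_pos hK, PySem.Int.floordiv_eq_ediv_of_pos hK,
        show ((k + 1 : Nat) : Int) - 1 = ((k : Nat) : Int) from by push_cast; ring]
    have hdm := Int.ediv_mul_add_emod end_ ((k + 1 : Nat) : Int)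
    have hr0 : 0 ≤ end_ % ((k + 1 : Nat) : Int) := Int.emod_nonneg end_ (by omega)
    have hrK : end_ % ((k + 1 : Nat) : Int) < ((k + 1 : Nat) : Int) := Int.emod_lt_of_pos end_ hK
    have hq0 : 0 ≤ end_ / ((k + 1 : Nat) : Int) := Int.ediv_nonneg h0 (by omega)
    generalize hqe : end_ / ((k + 1 : Nat) : Int) = q at hdm hq0 ⊢
    generalize hre : end_ % ((k + 1 : Nat) : Int) = r at hdm hr0 hrK ⊢
    have hkq : (0:Int) ≤ (k : Int) * q := by positivity
    have hnq : (k : Int) * q + r = end_ - q := by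
      have hdm' : q * ((k : Int) + 1) + r = end_ := by push_cast at hdm; exact hdm
      have hexp : q * ((k : Int) + 1) = (k : Int) * q + q := by ring
      omega
    rw [ih (end_ - q) _ (by omega) (by omega)]
    -- the peeled slice is the last chunk of the ladder over names.take end_
    have hlast := pvStream_last q hq0 k (names.take end_.toNat) r hr0 (by omega)
    rw [hnq] at hlast
    have hslice : PySem.List.slice names (some (end_ - q)) (some end_)
        = ((names.take end_.toNat).drop (end_ - q).toNat).take q.toNat := by
      rw [PySem.List.slice_toNat names (by omega) h0, List.drop_take]
      rw [show end_.toNat - (end_ - q).toNat = q.toNat from by omega]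
      rw [List.take_take, Nat.min_self]
    -- the first k chunks of the ladder over take (end_ - q) and over take end_ agree
    have hstreams : pvStream (names.take (end_ - q).toNat) ((end_ - q) / (k : Int)) ((end_ - q) % (k : Int)) k
        = pvStream (names.take end_.toNat) q r k := by
      rcases Nat.eq_zero_or_pos k with hk0 | hk0
      · subst hk0; rfl
      · have hkpos : (0:Int) < (k : Int) := by exact_mod_cast hk0
        rcases Int.lt_or_le r (k : Int) with hrlt | hrge
        · -- remainder not saturated: same quotient and remainder
          have hd := pv_divmod (a := end_ - q) (b := (k : Int)) (q := q) (r := r) hkpos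
            (by omega) hr0 hrlt
          rw [hd.1, hd.2]
          rw [pvStream_prefix q hq0 k names r _ (by rw [max_eq_left hr0]; omega),
              pvStream_prefix q hq0 k names r _ (by rw [max_eq_left hr0]; omega)]
        · -- r = k: quotient bumps by one, remainder zero
          have hrk : r = (k : Int) := by omega
          have hexp2 : (k : Int) * (q + 1) = (k : Int) * q + (k : Int) := by ring
          have hd := pv_divmod (a := end_ - q) (b := (k : Int)) (q := q + 1) (r := 0) hkpos
            (by omega) (by omega) hkpos
          rw [hd.1, hd.2]
          rw [pvStream_prefix (q + 1) (by omega) k names 0 _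
                (by rw [show max (0:Int) 0 = 0 from rfl]; omega),
              pvStream_prefix q hq0 k names r _ (by rw [max_eq_left hr0]; omega)]
          exact (pvStream_bump q k names r 0 (by omega) (by omega)).symm
    rw [hstreams, hslice, hlast]
    simp [List.reverse_append]

-- A = streaming take/drop fold: its running start index s corresponds to the suffix rl.drop s.toNat
lemma chunks_loop_eq (rl : List String) (q r : Int) (hq : 0 ≤ q) :
    ∀ (is : List Int) (acc : List (List String)) (s : Int), 0 ≤ s →
      (is.foldl
        (fun (st : List (List String) × Int) i =>
          let e := st.2 + q + (if i < r then 1 else 0)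
          (st.1 ++ [PySem.Set.ofList (PySem.List.slice rl (some st.2) (some e))], e))
        (acc, s)).1
      =
      (is.foldl
        (fun (st : List (List String) × List String) i =>
          let t := q + (if i < r then 1 else 0)
          (st.1 ++ [PySem.Set.ofList (st.2.take t.toNat)], st.2.drop t.toNat))
        (acc, rl.drop s.toNat)).1 := by
  intro is
  induction is with
  | nil => intro acc s _; rfl
  | cons i is ih =>
    intro acc s hs
    have hc : (0:Int) ≤ (if i < r then 1 else 0) := by split <;> omega
    simp only [List.foldl_cons]
    have hslice : PySem.List.slice rl (some s) (some (s + q + (if i < r then 1 else 0)))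
        = (rl.drop s.toNat).take ((q + (if i < r then 1 else 0)).toNat) := by
      rw [PySem.List.slice_toNat rl hs (by omega)]
      congr 1
      omega
    have hdrop : rl.drop (s + q + (if i < r then 1 else 0)).toNat
        = (rl.drop s.toNat).drop ((q + (if i < r then 1 else 0)).toNat) := by
      rw [List.drop_drop]
      congr 1
      omega
    rw [hslice, ← hdrop]
    exact ih (acc ++ [PySem.Set.ofList ((rl.drop s.toNat).take ((q + (if i < r then 1 else 0)).toNat))])
      (s + q + (if i < r then 1 else 0)) (by omega)

-- streaming fold over range(a, n) = pvStream with remainder r - a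
lemma stream_fold_eq (q r : Int) : ∀ (cnt : Nat) (a n : Int), a + cnt = n →
    ∀ (names : List String) (acc : List (List String)),
      ((PySem.List.pyRange a n 1).foldl
        (fun (st : List (List String) × List String) i =>
          let t := q + (if i < r then 1 else 0)
          (st.1 ++ [PySem.Set.ofList (st.2.take t.toNat)], st.2.drop t.toNat))
        (acc, names)).1
      = acc ++ pvStream names q (r - a) cnt := by
  intro cnt
  induction cnt with
  | zero =>
    intro a n h names acc
    rw [PySem.List.pyRange_one_eq_nil (show n ≤ a by omega)]
    simp [pvStream]
  | succ cnt ih =>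
    intro a n h names acc
    rw [PySem.List.pyRange_one_cons (show a < n by omega)]
    simp only [List.foldl_cons]
    have htest : (if a < r then (1:Int) else 0) = (if 0 < r - a then 1 else 0) := by
      split <;> split <;> omega
    rw [ih (a + 1) n (by omega), show r - (a + 1) = r - a - 1 from by ring]
    simp only [pvStream, htest]
    simp

-- ===== VERDICT (by name: the statement is the Claim_ definition above) =====
theorem split_read_set_py_spec : Claim_equal_split_read_set_py := by
  intro read_names n_chunks _
  unfold Spec_split_read_set_py split_read_set_py split_read_set_py_alt
  simp only []
  set rl := PySem.List.sorted read_names (fun x => x) false with hrl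
  set m : Int := (rl.length : Int) with hm
  set n : Int := if min n_chunks m = 0 then 1 else min n_chunks m with hn
  rcases Int.lt_or_le n 1 with hle | hpos
  · rw [pyRange_nonpos n (by omega)]
    rw [pvPeel, dif_neg (by omega)]
    rfl
  · have hm0 : 0 ≤ m := by positivity
    have hq : 0 ≤ PySem.Int.floordiv m n := by
      rw [PySem.Int.floordiv_eq_ediv_of_pos (by omega)]
      exact Int.ediv_nonneg hm0 (by omega)
    rw [chunks_loop_eq rl (PySem.Int.floordiv m n) (PySem.Int.mod m n) hq
      (PySem.List.pyRange 0 n 1) [] 0 (le_refl 0)]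
    rw [show Int.toNat 0 = 0 from rfl, List.drop_zero]
    rw [stream_fold_eq (PySem.Int.floordiv m n) (PySem.Int.mod m n) n.toNat 0 n (by omega) rl []]
    rw [List.nil_append]
    have hpeel := peel_eq rl n.toNat m [] hm0 hm.le
    rw [show ((n.toNat : Nat) : Int) = n from by omega] at hpeel
    rw [hpeel, List.nil_append, List.reverse_reverse]
    rw [show m.toNat = rl.length from by omega, List.take_length]
    rw [PySem.Int.floordiv_eq_ediv_of_pos (by omega), PySem.Int.mod_eq_emod_of_pos (by omega)]
    norm_num
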